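-- pv_equiv track=rewrite | github.com/biostochastics/APMODE | src/apmode/dsl/transforms.py | _prior_target_still_valid
-- ===== SOURCE A (Python) =====
-- def _prior_target_still_valid(target: str, structural_params: set[str]) -> bool:
--     """Check if a prior target still resolves to an existing parameter.
--
--     - structural targets (e.g. "CL"): must be in structural_params
--     - "omega_X" / "omega_iov_X": underlying X must be in structural_params
--     - "beta_X_COV": underlying X must be in structural_params
--     - "sigma_prop", "sigma_add", "corr_iiv": always kept (tied to obs/correlation block)
--     """
--     if target in structural_params:
--         return True
--     if target in ("sigma_prop", "sigma_add", "corr_iiv"):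
--         return True
--     if target.startswith("omega_iov_"):
--         return target[len("omega_iov_") :] in structural_params
--     if target.startswith("omega_"):
--         return target[len("omega_") :] in structural_params
--     if target.startswith("beta_"):
--         # beta_<PARAM>_<COVARIATE>; param may contain digits/underscores.
--         # Conservative: keep if *any* structural param matches the prefix.
--         rest = target[len("beta_") :]
--         return any(rest.startswith(f"{p}_") for p in structural_params)
--     return False
-- ===== SOURCE B (Python) =====
-- def _prior_target_still_valid(target: str, structural_params: set[str]) -> bool:
--     """Alternative decomposition: compute the candidate underlying names first,
--     then do a single membership pass over them (plus the target itself)."""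
--     if target in ("sigma_prop", "sigma_add", "corr_iiv"):
--         return True
--     if target.startswith("omega_iov_"):
--         cands = [target[10:]]
--     elif target.startswith("omega_"):
--         cands = [target[6:]]
--     elif target.startswith("beta_"):
--         rest = target[5:]
--         cands = [rest[:i] for i in range(len(rest)) if rest[i] == "_"]
--     else:
--         cands = []
--     return target in structural_params or any(c in structural_params for c in cands)
-- ===== Notes on version B (the rewrite author's own statement) =====
-- stated objective: alternative
-- what changed: Instead of A's guard cascade that returns inside each prefix branch, B first computes the list of candidate underlying parameter names (for beta_ by scanning underscore positions in the rest and taking prefixes, rather than iterating the param set with startswith) and finishes with a single membership pass.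
import Mathlib
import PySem

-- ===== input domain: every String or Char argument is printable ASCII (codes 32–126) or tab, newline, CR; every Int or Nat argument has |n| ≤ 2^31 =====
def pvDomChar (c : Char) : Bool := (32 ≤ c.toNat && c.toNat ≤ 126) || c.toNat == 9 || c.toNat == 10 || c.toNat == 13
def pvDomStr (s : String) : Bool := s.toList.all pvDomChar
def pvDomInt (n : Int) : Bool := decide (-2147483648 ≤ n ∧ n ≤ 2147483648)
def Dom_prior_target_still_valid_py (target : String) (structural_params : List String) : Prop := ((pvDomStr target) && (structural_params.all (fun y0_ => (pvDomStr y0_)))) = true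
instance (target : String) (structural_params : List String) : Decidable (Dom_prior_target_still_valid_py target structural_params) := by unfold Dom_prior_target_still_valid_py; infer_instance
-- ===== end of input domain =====

-- B computes the candidate underlying names first (beta_: underscore-position scan) and ends with one membership pass; same return value as A.
-- ===== PORT A =====
def prior_target_still_valid_py (target : String) (structural_params : List String) : Bool :=
  if structural_params.contains target then true
  else if target == "sigma_prop" || target == "sigma_add" || target == "corr_iiv" then true
  else if PySem.Str.startswith target "omega_iov_" then
    structural_params.contains (PySem.Str.slice target (some 10) none)
  else if PySem.Str.startswith target "omega_" then
    structural_params.contains (PySem.Str.slice target (some 6) none)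
  else if PySem.Str.startswith target "beta_" then
    let rest := PySem.Str.slice target (some 5) none
    structural_params.any (fun p => PySem.Str.startswith rest (p ++ "_"))
  else false

-- ===== PORT B =====
def prior_target_still_valid_py_alt (target : String) (structural_params : List String) : Bool :=
  if target == "sigma_prop" || target == "sigma_add" || target == "corr_iiv" then true
  else
    let cands : List String :=
      if PySem.Str.startswith target "omega_iov_" then [PySem.Str.slice target (some 10) none]
      else if PySem.Str.startswith target "omega_" then [PySem.Str.slice target (some 6) none]
      else if PySem.Str.startswith target "beta_" then
        let rest := PySem.Str.slice target (some 5) none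
        ((PySem.List.pyRange 0 (PySem.Str.len rest) 1).filter
            (fun i => PySem.Str.pyGet? rest i == some '_')).map
          (fun i => PySem.Str.slice rest none (some i))
      else []
    structural_params.contains target || cands.any (fun c => structural_params.contains c)

-- ===== PRECONDITION & SPEC =====
def Spec_prior_target_still_valid_py (target : String) (structural_params : List String) (out : Bool) : Prop := out = prior_target_still_valid_py_alt target structural_params
instance (target : String) (structural_params : List String) (out : Bool) : Decidable (Spec_prior_target_still_valid_py target structural_params out) := by unfold Spec_prior_target_still_valid_py; infer_instance

-- ===== CLAIM (what is proved, stated in full; the proofs are below) =====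
def Claim_equal_prior_target_still_valid_py : Prop := ∀ (target : String) (structural_params : List String), Dom_prior_target_still_valid_py target structural_params → Spec_prior_target_still_valid_py target structural_params (prior_target_still_valid_py target structural_params)

-- ===== LEMMAS AND PROOFS =====
-- Core lemma: A's beta_ scan over the param set equals B's underscore-position scan over rest.
theorem pv_beta_any (rest : String) (sp : List String) :
    sp.any (fun p => PySem.Str.startswith rest (p ++ "_")) =
    (((PySem.List.pyRange 0 (PySem.Str.len rest) 1).filter
        (fun i => PySem.Str.pyGet? rest i == some '_')).map
      (fun i => PySem.Str.slice rest none (some i))).any (fun c => sp.contains c) := by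
  rw [Bool.eq_iff_iff]
  simp only [List.any_eq_true, List.mem_map, List.mem_filter, PySem.List.mem_pyRange_one,
    PySem.Str.startswith_eq, PySem.Chars.startswith_iff, String.toList_append,
    PySem.Str.pyGet?_eq, PySem.Chars.pyGet?_eq_listPyGet?, PySem.Str.len_eq,
    List.contains_iff_mem, beq_iff_eq]
  have hu : ("_" : String).toList = ['_'] := rfl
  constructor
  · rintro ⟨p, hp, hpre⟩
    obtain ⟨t, ht⟩ := hpre
    rw [hu, List.append_assoc] at ht
    refine ⟨PySem.Str.slice rest none (some (p.toList.length : Int)),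
      ⟨(p.toList.length : Int), ⟨⟨by positivity, ?_⟩, ?_⟩, rfl⟩, ?_⟩
    · have hlen : p.toList.length + (t.length + 1) = rest.toList.length := by
        simpa using congrArg List.length ht
      have : p.toList.length < rest.toList.length := by omega
      exact_mod_cast this
    · rw [PySem.List.pyGet?_natCast, ← ht, List.getElem?_append_right (le_refl _)]
      simp
    · have : (PySem.Str.slice rest none (some (p.toList.length : Int))).toList = p.toList := by
        rw [PySem.Str.toList_slice, PySem.Chars.slice_eq_listSlice,
          PySem.List.slice_to_natCast, ← ht, List.take_left' rfl]
      rw [String.toList_inj.mp this]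
      exact hp
  · rintro ⟨c, ⟨i, ⟨⟨hi0, hilen⟩, hget⟩, rfl⟩, hc⟩
    refine ⟨PySem.Str.slice rest none (some i), hc, ?_⟩
    have htl : (PySem.Str.slice rest none (some i)).toList = rest.toList.take i.toNat := by
      rw [PySem.Str.toList_slice, PySem.Chars.slice_eq_listSlice, PySem.List.slice_to _ hi0]
    rw [htl, hu]
    rw [PySem.List.pyGet?_of_nonneg _ hi0] at hget
    have : rest.toList.take i.toNat ++ ['_'] = rest.toList.take (i.toNat + 1) := by
      rw [List.take_add_one, hget]
      rfl
    rw [this]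
    exact List.take_prefix _ _

-- ===== VERDICT (by name: the statement is the Claim_ definition above) =====
theorem prior_target_still_valid_py_spec : Claim_equal_prior_target_still_valid_py := by
  intro target sp _
  unfold Spec_prior_target_still_valid_py
  by_cases hm : sp.contains target = true
  · simp only [prior_target_still_valid_py, prior_target_still_valid_py_alt, hm, if_true]
    split_ifs <;> simp
  · have hm' : sp.contains target = false := by simpa using hm
    simp only [prior_target_still_valid_py, prior_target_still_valid_py_alt, hm',
      Bool.false_eq_true, if_false, Bool.false_or]
    split_ifs with h1 h2 h3 h4
    · rfl
    · simp
    · simp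
    · exact pv_beta_any _ sp
    · simp
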